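-- pv_equiv track=rewrite | github.com/quicycle/mart | arpy/arpy/utils/utils.py | power_notation
-- ===== SOURCE A (Python) =====
-- from collections import Counter
--
-- def power_notation(lst):
--     """
--     Given a list of elements (typically representing values of some sort,
--     relating to a string representation of the result of a computation)
--     express repeated elements in a^b power notation.
--     """
--     result = []
--
--     for item, power in Counter(lst).items():
--         if power == 1:
--             result.append(str(item))
--         else:
--             result.append(f"{item}^{power}")
--
--     return result
-- ===== SOURCE B (Python) =====
-- def power_notation(lst):
--     result = []
--     while lst:
--         head = lst[0]
--         rest = [x for x in lst if x != head]
--         count = len(lst) - len(rest)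
--         result.append(str(head) if count == 1 else f"{head}^{count}")
--         lst = rest
--     return result
-- ===== Notes on version B (the rewrite author's own statement) =====
-- stated objective: alternative
-- what changed: Replaced the Counter tally-then-emit loop with a partition loop: repeatedly take the first element, filter out all its occurrences (the multiplicity is the length drop), emit its entry, and continue on the shrunken remainder.
import Mathlib
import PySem

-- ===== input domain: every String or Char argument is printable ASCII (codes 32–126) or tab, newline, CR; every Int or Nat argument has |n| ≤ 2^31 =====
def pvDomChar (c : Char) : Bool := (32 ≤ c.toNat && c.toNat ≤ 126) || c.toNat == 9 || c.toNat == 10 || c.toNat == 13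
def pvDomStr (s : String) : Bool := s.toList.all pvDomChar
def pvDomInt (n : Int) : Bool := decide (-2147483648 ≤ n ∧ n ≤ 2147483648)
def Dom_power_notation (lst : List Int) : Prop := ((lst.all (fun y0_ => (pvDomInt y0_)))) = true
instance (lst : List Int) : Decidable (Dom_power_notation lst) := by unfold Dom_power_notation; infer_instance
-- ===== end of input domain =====

-- B replaces A's Counter tally with a partition loop: repeatedly take the first element,
-- filter out all its occurrences (multiplicity = length drop), emit its entry, continue
-- on the remainder — an alternative decomposition, same return value.


-- ===== PORT A =====
-- for item, power in Counter(lst).items(): append str(item) or f"{item}^{power}"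
def power_notation (lst : List Int) : List String :=
  (PySem.Dict.counter lst).items.foldl
    (fun result p =>
      if p.2 == 1 then result ++ [PySem.Int.toStr p.1]
      else result ++ [PySem.Int.toStr p.1 ++ "^" ++ PySem.Int.toStr p.2])
    []

-- ===== PORT B =====
-- the while loop of Source B as structural recursion on the (strictly shrinking) list
def power_notation_alt : List Int → List String
  | [] => []
  | head :: t =>
    let rest := (head :: t).filter (fun x => decide (x ≠ head))
    let count : Int := ((head :: t).length : Int) - (rest.length : Int)
    (if count == 1 then PySem.Int.toStr head
     else PySem.Int.toStr head ++ "^" ++ PySem.Int.toStr count) :: power_notation_alt rest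
termination_by lst => lst.length
decreasing_by
  simp only [List.filter_cons, ne_eq, not_true_eq_false, decide_false,
    List.length_cons]
  exact Nat.lt_succ_of_le (List.length_filter_le _ _)

-- ===== PRECONDITION & SPEC =====
def Spec_power_notation (lst : List Int) (out : List String) : Prop := out = power_notation_alt lst
instance (lst : List Int) (out : List String) : Decidable (Spec_power_notation lst out) := by unfold Spec_power_notation; infer_instance

-- ===== CLAIM (what is proved, stated in full; the proofs are below) =====
def Claim_equal_power_notation : Prop := ∀ (lst : List Int), Dom_power_notation lst → Spec_power_notation lst (power_notation lst)

-- ===== LEMMAS AND PROOFS =====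

-- A's fold appends one entry per Counter item: it is a map over the items list
theorem pn_foldl_if_append {α : Type} (p : α → Bool) (f g : α → String)
    (l : List α) (acc : List String) :
    l.foldl (fun r x => if p x then r ++ [f x] else r ++ [g x]) acc =
      acc ++ l.map (fun x => if p x then f x else g x) := by
  induction l generalizing acc with
  | nil => simp
  | cons a t ih => simp [List.foldl_cons, ih]; split <;> simp

-- appending to a set that already holds h ignores every later h
theorem pn_foldl_add_filter (h : Int) :
    ∀ (t s : List Int), h ∈ s →
      t.foldl PySem.Set.add s = (t.filter (fun x => decide (x ≠ h))).foldl PySem.Set.add s := by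
  intro t
  induction t with
  | nil => intro s _; rfl
  | cons a t ih =>
    intro s hs
    by_cases hah : a = h
    · subst hah
      have hadd : PySem.Set.add s a = s := by simp [PySem.Set.add, hs]
      simp [List.foldl_cons, hadd, ih s hs]
    · have hmem : h ∈ PySem.Set.add s a := by
        simp [PySem.Set.add]; split <;> simp [hs]
      simp [hah, List.foldl_cons, ih _ hmem]

-- folding over h-free elements keeps the leading h in front
theorem pn_foldl_add_cons (h : Int) :
    ∀ (t s : List Int), (∀ x ∈ t, x ≠ h) →
      t.foldl PySem.Set.add (h :: s) = h :: t.foldl PySem.Set.add s := by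
  intro t
  induction t with
  | nil => intro s _; rfl
  | cons a t ih =>
    intro s hfree
    have hah : a ≠ h := hfree a (by simp)
    have hadd : PySem.Set.add (h :: s) a = h :: PySem.Set.add s a := by
      simp [PySem.Set.add, hah]
      split <;> simp
    rw [List.foldl_cons, hadd, ih _ (fun x hx => hfree x (by simp [hx])), List.foldl_cons]

-- first-occurrence dedup peels its head: set(h::t) = h :: set(t with h removed)
theorem pn_ofList_cons (h : Int) (t : List Int) :
    PySem.Set.ofList (h :: t) =
      h :: PySem.Set.ofList (t.filter (fun x => decide (x ≠ h))) := by
  rw [PySem.Set.ofList_eq_foldl, PySem.Set.ofList_eq_foldl]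
  have h0 : PySem.Set.add ([] : List Int) h = [h] := by simp [PySem.Set.add]
  rw [List.foldl_cons, h0,
      pn_foldl_add_filter h t [h] (by simp),
      pn_foldl_add_cons h _ [] (fun x hx => by
        simpa using (List.of_mem_filter hx))]

-- removing every h drops exactly count h elements
theorem pn_len_split (h : Int) : ∀ l : List Int,
    (l.filter (fun x => decide (x ≠ h))).length + l.count h = l.length := by
  intro l
  induction l with
  | nil => simp
  | cons a t ih =>
    simp only [ne_eq, decide_not] at ih ⊢
    simp only [List.filter_cons, List.count_cons, List.length_cons]
    by_cases hah : a = h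
    · simp [hah]; omega
    · simp [hah]; omega

-- the core equivalence: A's per-key map over the dedup equals B's partition recursion
theorem pn_map_eq_alt : ∀ (n : ℕ) (lst : List Int), lst.length ≤ n →
    (PySem.Set.ofList lst).map
      (fun k => if ((lst.count k : Int)) == 1 then PySem.Int.toStr k
                else PySem.Int.toStr k ++ "^" ++ PySem.Int.toStr ((lst.count k : Int))) =
      power_notation_alt lst := by
  intro n
  induction n with
  | zero =>
    intro lst hlen
    have hnil : lst = [] := List.eq_nil_of_length_eq_zero (Nat.le_zero.mp hlen)
    subst hnil
    rw [PySem.Set.ofList_eq_foldl]; simp [power_notation_alt]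
  | succ n ih =>
    intro lst hlen
    cases lst with
    | nil => rw [PySem.Set.ofList_eq_foldl]; simp [power_notation_alt]
    | cons h t =>
      have hfilter : (h :: t).filter (fun x => decide (x ≠ h)) =
          t.filter (fun x => decide (x ≠ h)) := by simp
      have hsplit := pn_len_split h (h :: t)
      rw [hfilter] at hsplit
      have hlen' : (t.filter (fun x => decide (x ≠ h))).length ≤ n := by
        have hle : (t.filter (fun x => decide (x ≠ h))).length ≤ t.length :=
          List.length_filter_le _ _
        simp only [List.length_cons] at hlen
        omega
      have hcast : ((h :: t).length : Int) - (((h :: t).filter (fun x => decide (x ≠ h))).length : Int)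
          = ((h :: t).count h : Int) := by
        rw [hfilter]; omega
      rw [pn_ofList_cons, List.map_cons]
      simp only [power_notation_alt]
      rw [hcast]
      congr 1
      rw [hfilter, ← ih (t.filter (fun x => decide (x ≠ h))) hlen']
      apply List.map_congr_left
      intro k hk
      have hkmem : k ∈ t.filter (fun x => decide (x ≠ h)) := by
        have := PySem.Set.mem_ofList (xs := t.filter (fun x => decide (x ≠ h))) (y := k)
        exact this.mp hk
      have hkh : k ≠ h := by simpa using (List.of_mem_filter hkmem)
      have hcnt : (h :: t).count k = (t.filter (fun x => decide (x ≠ h))).count k := by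
        rw [List.count_filter (by simp [hkh]), List.count_cons]
        simp [Ne.symm hkh]
      rw [hcnt]

-- ===== VERDICT (by name: the statement is the Claim_ definition above) =====
theorem power_notation_spec : Claim_equal_power_notation := by
  intro lst _
  unfold Spec_power_notation power_notation
  rw [PySem.Dict.items_counter, pn_foldl_if_append, List.map_map]
  simp only [List.nil_append]
  exact pn_map_eq_alt lst.length lst le_rfl
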